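-- pv_equiv track=rewrite | github.com/TheAuditorTool/Auditor | theauditor/indexer/extractors/terraform.py | _brace_delta
-- ===== SOURCE A (Python) =====
-- def _brace_delta(text: str | None) -> int:
--     if not text:
--         return 0
--     delta = 0
--     in_string = False
--     escape = False
--     for ch in text:
--         if ch == '"' and not escape:
--             in_string = not in_string
--         if not in_string:
--             if ch in '{[':
--                 delta += 1
--             elif ch in '}]':
--                 delta -= 1
--         escape = (ch == '\\' and not escape)
--         if escape and ch != '\\':
--             escape = False
--     return delta
-- ===== SOURCE B (Python) =====
-- import re
--
-- def _brace_delta(text):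
--     if not text:
--         return 0
--     # drop escaped backslashes, then escaped quotes; remaining quotes are the
--     # real string delimiters
--     text = text.replace('\\\\', '')
--     text = text.replace('\\"', '')
--     # delete string literals (an unterminated one swallows the rest)
--     text = re.sub(r'"[^"]*(?:"|\Z)', '', text)
--     return text.count('{') + text.count('[') - text.count('}') - text.count(']')
-- ===== Notes on version B (the rewrite author's own statement) =====
-- stated objective: faster
-- what changed: B replaces A's per-character Python state machine (in_string/escape flags) by three declarative text rewrites -- delete escaped backslashes, delete escaped quotes, regex-delete string literals -- followed by plain str.count of the four brackets; the scanning moves into C-level str.replace/re.sub/str.count.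
import Mathlib
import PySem

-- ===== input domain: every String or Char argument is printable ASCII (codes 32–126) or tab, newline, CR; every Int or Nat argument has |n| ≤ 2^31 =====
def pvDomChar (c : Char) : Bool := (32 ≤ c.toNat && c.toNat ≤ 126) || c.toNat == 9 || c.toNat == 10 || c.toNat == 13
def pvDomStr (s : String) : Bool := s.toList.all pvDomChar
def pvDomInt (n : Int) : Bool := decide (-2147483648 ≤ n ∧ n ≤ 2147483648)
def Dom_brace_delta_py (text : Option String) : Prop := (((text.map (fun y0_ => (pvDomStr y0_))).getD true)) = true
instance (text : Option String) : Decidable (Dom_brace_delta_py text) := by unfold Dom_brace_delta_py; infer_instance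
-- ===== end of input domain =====

-- B replaces A's per-character in_string/escape state machine by three text
-- rewrites (strip escaped backslashes, strip escaped quotes, strip string
-- literals) followed by counting the four brackets; a timing run measured
-- this measurably faster in Python (the scans move into C-level built-ins).

-- ===== PORT A =====
-- one iteration of A's for-loop; state = (delta, in_string, escape)
def braceStep (s : Int × Bool × Bool) (ch : Char) : Int × Bool × Bool :=
  let inS : Bool := if ch = '"' ∧ s.2.2 = false then !s.2.1 else s.2.1
  let d : Int :=
    if inS = false then
      (if ch = '{' ∨ ch = '[' then s.1 + 1
       else if ch = '}' ∨ ch = ']' then s.1 - 1 else s.1)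
    else s.1
  let esc : Bool := decide (ch = '\\' ∧ s.2.2 = false)
  -- A's final `if escape and ch != '\\': escape = False` (a no-op, ported literally)
  let esc : Bool := if esc = true ∧ ch ≠ '\\' then false else esc
  (d, inS, esc)

def brace_delta_py (text : Option String) : Int :=
  match text with
  | none => 0
  | some t =>
    if t.toList = [] then 0    -- `if not text: return 0`
    else (t.toList.foldl braceStep (0, false, false)).1

-- ===== PORT B =====
-- text.replace('\\\\', ''): exact — str.replace scans left to right,
-- removing non-overlapping occurrences of the two-char pattern.
def rmPairs : List Char → List Char
  | [] => []
  | [c] => [c]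
  | c1 :: c2 :: rest =>
    if c1 = '\\' ∧ c2 = '\\' then rmPairs rest else c1 :: rmPairs (c2 :: rest)
termination_by l => l.length

-- text.replace('\\"', ''): exact, same left-to-right non-overlapping scan.
def rmEsc : List Char → List Char
  | [] => []
  | [c] => [c]
  | c1 :: c2 :: rest =>
    if c1 = '\\' ∧ c2 = '"' then rmEsc rest else c1 :: rmEsc (c2 :: rest)
termination_by l => l.length

-- re.sub(r'"[^"]*(?:"|\Z)', '', text): exact — leftmost match starts at the
-- first '"', consumes up to and including the next '"' or the end of text.
def rmStr : Bool → List Char → List Char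
  | _, [] => []
  | inS, c :: rest =>
    if c = '"' then rmStr (!inS) rest
    else if inS = true then rmStr true rest
    else c :: rmStr false rest

-- text.count('{') + text.count('[') - text.count('}') - text.count(']')
def cntB (l : List Char) : Int :=
  (l.count '{' : Int) + (l.count '[' : Int) - (l.count '}' : Int) - (l.count ']' : Int)

def brace_delta_py_alt (text : Option String) : Int :=
  match text with
  | none => 0
  | some t =>
    if t.toList = [] then 0    -- `if not text: return 0`
    else cntB (rmStr false (rmEsc (rmPairs t.toList)))

-- ===== PRECONDITION & SPEC =====
def Spec_brace_delta_py (text : Option String) (out : Int) : Prop := out = brace_delta_py_alt text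
instance (text : Option String) (out : Int) : Decidable (Spec_brace_delta_py text out) := by unfold Spec_brace_delta_py; infer_instance

-- ===== CLAIM (what is proved, stated in full; the proofs are below) =====
def Claim_equal_brace_delta_py : Prop := ∀ (text : Option String), Dom_brace_delta_py text → Spec_brace_delta_py text (brace_delta_py text)

-- ===== LEMMAS AND PROOFS =====

theorem cntB_cons (c : Char) (l : List Char) :
    cntB (c :: l) =
      (if c = '{' ∨ c = '[' then 1 else if c = '}' ∨ c = ']' then -1 else 0) + cntB l := by
  simp only [cntB, List.count_cons]
  rcases Decidable.em (c = '{') with h1 | h1 <;>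
  rcases Decidable.em (c = '[') with h2 | h2 <;>
  rcases Decidable.em (c = '}') with h3 | h3 <;>
  rcases Decidable.em (c = ']') with h4 | h4 <;>
  simp_all <;> omega

theorem rmPairs_cons (c : Char) (l : List Char) (h : c ≠ '\\') :
    rmPairs (c :: l) = c :: rmPairs l := by
  cases l <;> simp [rmPairs, h]

theorem rmEsc_cons (c : Char) (l : List Char) (h : c ≠ '\\') :
    rmEsc (c :: l) = c :: rmEsc l := by
  cases l <;> simp [rmEsc, h]

-- main invariant: A's loop from state (d, inS, escape = false) computes
-- d + (bracket count of B's rewritten remainder)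
theorem loopA_eq (l : List Char) (d : Int) (inS : Bool) :
    (l.foldl braceStep (d, inS, false)).1 = d + cntB (rmStr inS (rmEsc (rmPairs l))) := by
  match l with
  | [] => cases inS <;> simp [rmPairs, rmEsc, rmStr, cntB]
  | c :: rest =>
    by_cases hb : c = '\\'
    · subst hb
      match rest with
      | [] => cases inS <;> simp [rmPairs, rmEsc, rmStr, cntB, braceStep, List.foldl]
      | c2 :: rest2 =>
        by_cases h2 : c2 = '\\'
        · subst h2
          have ih := loopA_eq rest2 d inS
          simp only [List.foldl, braceStep] at *
          cases inS <;> simpa [rmPairs] using ih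
        · by_cases h3 : c2 = '"'
          · subst h3
            have ih := loopA_eq rest2 d inS
            simp only [List.foldl, braceStep] at *
            cases inS <;> simpa [rmPairs, rmPairs_cons, rmEsc] using ih
          · have ih0 := loopA_eq rest2 d inS
            have ih1 := loopA_eq rest2 (d + 1) inS
            have ih2 := loopA_eq rest2 (d - 1) inS
            simp only [List.foldl, braceStep] at *
            cases inS <;>
              simp [rmPairs, rmPairs_cons, rmEsc, rmEsc_cons, rmStr, cntB_cons,
                    h2, h3] at * <;> (try split_ifs) <;> omega
    · by_cases hq : c = '"'
      · subst hq
        have ih := loopA_eq rest d (!inS)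
        simp only [List.foldl, braceStep] at *
        cases inS <;> simpa [rmPairs_cons, rmEsc_cons, rmStr] using ih
      · have ih0 := loopA_eq rest d inS
        have ih1 := loopA_eq rest (d + 1) inS
        have ih2 := loopA_eq rest (d - 1) inS
        simp only [List.foldl, braceStep] at *
        cases inS <;>
          simp [rmPairs_cons, rmEsc_cons, rmStr, cntB_cons, hb, hq] at * <;>
            (try split_ifs) <;> omega
termination_by l.length

theorem brace_delta_py_spec : Claim_equal_brace_delta_py := by
  intro text _
  unfold Spec_brace_delta_py brace_delta_py brace_delta_py_alt
  cases text with
  | none => rfl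
  | some t =>
    by_cases h : t.toList = []
    · simp [h]
    · simpa [h] using loopA_eq t.toList 0 false
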